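-- pv_equiv track=rewrite | github.com/SSCT-Lab/NLPLego | process_utils.py | check_continuity
-- ===== SOURCE A (Python) =====
-- def check_continuity(key_words, words, search_start):
--     flag = False
--     s_idx = search_start
--     while not flag:
--         if key_words[0] in words[s_idx + 1:]:
--             s_idx = words.index(key_words[0], s_idx + 1)
--         else:
--             return -1
--         if s_idx + len(key_words) > len(words):
--             return -1
--         for i in range(s_idx, s_idx + len(key_words)):
--             if words[i] == key_words[i - s_idx]:
--                 flag = True
--             else:
--                 flag = False
--                 break
--
--     return s_idx
-- ===== SOURCE B (Python) =====
-- def check_continuity(key_words, words, search_start):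
--     tail = words[search_start + 1:]
--     k = len(key_words)
--     offset = len(words) - len(tail)
--     for i in range(len(tail) - k + 1):
--         if tail[i:i + k] == key_words:
--             return offset + i
--     return -1
-- ===== Notes on version B (the rewrite author's own statement) =====
-- stated objective: simpler
-- what changed: A jumps between successive occurrences of key_words[0] via repeated list.index calls inside a while loop with a flag-driven inner verification loop; B slices off the tail words[search_start+1:] once and does a single sliding-window scan comparing tail[i:i+k] == key_words. Pre_ excludes only empty key_words, on which A raises IndexError at key_words[0].
import Mathlib
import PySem

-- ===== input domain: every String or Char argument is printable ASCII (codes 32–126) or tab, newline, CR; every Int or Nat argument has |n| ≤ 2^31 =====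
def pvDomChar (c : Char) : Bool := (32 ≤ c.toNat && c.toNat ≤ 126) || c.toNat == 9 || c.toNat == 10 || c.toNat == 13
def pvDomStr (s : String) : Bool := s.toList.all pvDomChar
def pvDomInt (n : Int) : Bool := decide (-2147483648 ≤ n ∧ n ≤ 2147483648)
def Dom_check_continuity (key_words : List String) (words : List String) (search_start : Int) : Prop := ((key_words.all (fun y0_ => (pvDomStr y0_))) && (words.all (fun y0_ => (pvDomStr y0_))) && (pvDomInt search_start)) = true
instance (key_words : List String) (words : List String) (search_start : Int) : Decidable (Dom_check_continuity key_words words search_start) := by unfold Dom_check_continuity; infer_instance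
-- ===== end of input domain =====

-- B replaces A's index-jumping while loop (repeated list.index + flag-driven inner verify loop)
-- by a single sliding-window scan of the tail words[search_start+1:]; objective: simpler.


-- ===== PORT A =====
-- the inner 'for i in range(s_idx, s_idx + len(key_words))' loop carrying the 'flag' variable
-- (indices produced by the loop are always in range; pyGetD's default is never used there)
def ccInner (kw words : List String) (s_idx : Int) : List Int → Bool → Bool
  | [], flag => flag
  | i :: rest, _flag =>
    if PySem.List.pyGetD words i "" == PySem.List.pyGetD kw (i - s_idx) ""
    then ccInner kw words s_idx rest true
    else false

-- effective start of 'words[s_idx+1:]' / 'words.index(k0, s_idx+1)' (Python clamps the start bound)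
def ccStart (n : Nat) (s_idx : Int) : Nat := PySem.List.clampIdx n (s_idx + 1)

-- termination helper cited by ccLoop's decreasing_by
theorem ccStart_lt (n : Nat) (s : Int) (h : ccStart n s < n) : s < (ccStart n s : Int) := by
  unfold ccStart PySem.List.clampIdx at h ⊢
  split_ifs at h ⊢ <;> omega

theorem ccStart_le (n : Nat) (s : Int) : ccStart n s ≤ n := by
  unfold ccStart PySem.List.clampIdx
  split_ifs <;> omega

-- the 'while not flag' loop of A: 's_idx = words.index(key_words[0], s_idx + 1)' or return -1,
-- the 's_idx + len(key_words) > len(words)' bail-out, then the inner verification loop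
def ccLoop (k0 : String) (kw words : List String) (s_idx : Int) : Int :=
  match h : PySem.List.index? (words.drop (ccStart words.length s_idx)) k0 with
  | none => -1
  | some j =>
    let s' : Int := (ccStart words.length s_idx : Int) + j
    if s' + kw.length > (words.length : Int) then -1
    else if ccInner kw words s' (PySem.List.pyRange s' (s' + kw.length)) false then s'
    else ccLoop k0 kw words s'
termination_by ((words.length : Int) + 1 - s_idx).toNat
decreasing_by
  obtain ⟨hk, _, _⟩ := PySem.List.getElem_of_index?_eq_some h
  rw [List.length_drop] at hk
  have h1 := ccStart_le words.length s_idx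
  have h2 : ccStart words.length s_idx < words.length := by omega
  have h3 := ccStart_lt words.length s_idx h2
  omega

def check_continuity (key_words : List String) (words : List String) (search_start : Int) : Int :=
  match key_words with
  | [] => -1   -- Python raises IndexError at key_words[0] here; excluded by Pre_
  | k0 :: rest => ccLoop k0 (k0 :: rest) words search_start

-- ===== PORT B =====
-- B: tail = words[search_start+1:]; scan 'for i in range(len(tail)-k+1)' comparing
-- tail[i:i+k] == key_words, returning offset + i with offset = len(words) - len(tail)
def check_continuity_alt (key_words : List String) (words : List String) (search_start : Int) : Int :=
  let tail : List String := PySem.List.slice words (some (search_start + 1)) none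
  let k : Int := key_words.length
  let offset : Int := (words.length : Int) - tail.length
  match (PySem.List.pyRange 0 ((tail.length : Int) - k + 1)).find?
      (fun i => PySem.List.slice tail (some i) (some (i + k)) == key_words) with
  | some i => offset + i
  | none => -1

-- ===== PRECONDITION & SPEC =====
-- Pre_ excludes only empty key_words, on which A raises IndexError at key_words[0].
def Pre_check_continuity (key_words : List String) (words : List String) (search_start : Int) : Prop :=
  key_words ≠ []
instance (key_words : List String) (words : List String) (search_start : Int) : Decidable (Pre_check_continuity key_words words search_start) := by unfold Pre_check_continuity; infer_instance

def pvWitness_check_continuity : List String × List String × Int := (["a", "b"], ["x", "a", "b"], 0)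

def Spec_check_continuity (key_words : List String) (words : List String) (search_start : Int) (out : Int) : Prop := out = check_continuity_alt key_words words search_start
instance (key_words : List String) (words : List String) (search_start : Int) (out : Int) : Decidable (Spec_check_continuity key_words words search_start out) := by unfold Spec_check_continuity; infer_instance

-- ===== CLAIM (what is proved, stated in full; the proofs are below) =====
def Claim_equal_check_continuity : Prop := ∀ (key_words : List String) (words : List String) (search_start : Int), Dom_check_continuity key_words words search_start → Pre_check_continuity key_words words search_start → Spec_check_continuity key_words words search_start (check_continuity key_words words search_start)

-- ===== LEMMAS AND PROOFS =====

-- proof-only: B's scan expressed over absolute indices starting at lower bound c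
def findR (kw words : List String) (c : Int) : Int :=
  match (PySem.List.pyRange c ((words.length : Int) - kw.length + 1)).find?
      (fun i => PySem.List.slice words (some i) (some (i + (kw.length : Int))) == kw) with
  | some i => i
  | none => -1

theorem pMatch_head {k0 : String} {rest words : List String} {i : Int} (h0 : 0 ≤ i)
    (h : (PySem.List.slice words (some i) (some (i + ((k0 :: rest).length : Int))) == (k0 :: rest)) = true) :
    words[i.toNat]? = some k0 := by
  rw [PySem.List.slice_toNat words h0 (by omega), beq_iff_eq] at h
  have h1 : (List.take ((i + ((k0 :: rest).length : Int)).toNat - i.toNat) (List.drop i.toNat words))[0]? = some k0 := by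
    rw [h]; rfl
  rw [List.getElem?_take] at h1
  have hm : 0 < (i + ((k0 :: rest).length : Int)).toNat - i.toNat := by
    simp only [List.length_cons]; omega
  rw [if_pos hm, List.getElem?_drop, Nat.add_zero] at h1
  exact h1

theorem ccInner_true (kw words : List String) (s : Int) (l : List Int) :
    ccInner kw words s l true
      = l.all (fun i => PySem.List.pyGetD words i "" == PySem.List.pyGetD kw (i - s) "") := by
  induction l with
  | nil => rfl
  | cons i rest ih =>
    cases hc : (PySem.List.pyGetD words i "" == PySem.List.pyGetD kw (i - s) "") <;>
      simp [ccInner, hc, ih]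

theorem all_range_eq_slice (kw words : List String) (_hkw : kw ≠ []) (s : Int) (h0 : 0 ≤ s)
    (hle : s + (kw.length : Int) ≤ (words.length : Int)) :
    (PySem.List.pyRange s (s + (kw.length : Int))).all
        (fun i => PySem.List.pyGetD words i "" == PySem.List.pyGetD kw (i - s) "")
      = (PySem.List.slice words (some s) (some (s + (kw.length : Int))) == kw) := by
  rw [PySem.List.slice_toNat words h0 (by omega), Bool.eq_iff_iff, List.all_eq_true, beq_iff_eq]
  have hlen : (List.take ((s + (kw.length : Int)).toNat - s.toNat) (List.drop s.toNat words)).length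
      = kw.length := by
    simp only [List.length_take, List.length_drop]; omega
  constructor
  · intro hall
    apply List.ext_getElem?
    intro m
    by_cases hm : m < kw.length
    · have hp := hall (s + (m : Int)) (PySem.List.mem_pyRange_one.mpr ⟨by omega, by omega⟩)
      rw [PySem.List.pyGetD_of_nonneg words _ (by omega),
          PySem.List.pyGetD_of_nonneg kw _ (by omega), beq_iff_eq] at hp
      have e1 : ((s : Int) + m).toNat = s.toNat + m := by omega
      have e2 : ((s + (m : Int)) - s).toNat = m := by omega
      rw [e1, e2, List.getD_eq_getElem?_getD, List.getD_eq_getElem?_getD] at hp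
      rw [List.getElem?_take, if_pos (by omega), List.getElem?_drop]
      have hw : s.toNat + m < words.length := by omega
      have hk : m < kw.length := hm
      rw [List.getElem?_eq_getElem hw, List.getElem?_eq_getElem hk]
      rw [List.getElem?_eq_getElem hw, List.getElem?_eq_getElem hk] at hp
      simpa using hp
    · rw [List.getElem?_eq_none (by omega), List.getElem?_eq_none (by omega)]
  · intro heq i hi
    obtain ⟨hi1, hi2⟩ := PySem.List.mem_pyRange_one.mp hi
    rw [PySem.List.pyGetD_of_nonneg words _ (by omega),
        PySem.List.pyGetD_of_nonneg kw _ (by omega), beq_iff_eq]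
    have hm : (i - s).toNat < kw.length := by omega
    have := congrArg (fun l => l[(i - s).toNat]?) heq
    simp only [List.getElem?_take, if_pos (by omega : (i - s).toNat < (s + (kw.length : Int)).toNat - s.toNat),
      List.getElem?_drop] at this
    have hw : s.toNat + (i - s).toNat < words.length := by omega
    rw [List.getElem?_eq_getElem hw, List.getElem?_eq_getElem hm] at this
    have ei : i.toNat = s.toNat + (i - s).toNat := by omega
    rw [List.getD_eq_getElem?_getD, List.getD_eq_getElem?_getD, ei,
        List.getElem?_eq_getElem hw, List.getElem?_eq_getElem hm]
    simpa using this

theorem inner_eq_pMatch (kw words : List String) (hkw : kw ≠ []) (s : Int) (h0 : 0 ≤ s)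
    (hle : s + kw.length ≤ (words.length : Int)) :
    ccInner kw words s (PySem.List.pyRange s (s + (kw.length : Int))) false
      = (PySem.List.slice words (some s) (some (s + (kw.length : Int))) == kw) := by
  have hk1 : 1 ≤ (kw.length : Int) := by
    cases kw with
    | nil => exact absurd rfl hkw
    | cons a l => simp only [List.length_cons]; omega
  rw [← all_range_eq_slice kw words hkw s h0 hle]
  rw [PySem.List.pyRange_one_cons (by omega : s < s + (kw.length : Int))]
  simp only [ccInner, ccInner_true, List.all_cons]
  cases hc : (PySem.List.pyGetD words s "" == PySem.List.pyGetD kw (s - s) "") with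
  | false => simp
  | true => simp

theorem ccStart_succ (n : Nat) (s' : Int) (h0 : 0 ≤ s') (h1 : s' < (n : Int)) :
    ((ccStart n s' : Nat) : Int) = s' + 1 := by
  unfold ccStart PySem.List.clampIdx
  split_ifs <;> omega

-- below the first occurrence of k0 at/after c there is no full match
theorem no_match_below (k0 : String) (rest words : List String) (c j : Nat)
    (hidx : PySem.List.index? (words.drop c) k0 = some j) (i : Int)
    (hic : (c : Int) ≤ i) (hij : i < (c : Int) + j) (hin : i < (words.length : Int)) :
    (PySem.List.slice words (some i) (some (i + ((k0 :: rest).length : Int))) == (k0 :: rest)) = false := by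
  obtain ⟨hk, _, hmin⟩ := PySem.List.getElem_of_index?_eq_some hidx
  rw [List.length_drop] at hk
  by_contra hb
  rw [Bool.not_eq_false] at hb
  have hhead := pMatch_head (by omega) hb
  have hlt : i.toNat - c < j := by omega
  have hne := hmin (i.toNat - c) hlt
  rw [List.getElem_drop] at hne
  have hw : c + (i.toNat - c) < words.length := by omega
  have : words[i.toNat]? ≠ some k0 := by
    have e : c + (i.toNat - c) = i.toNat := by omega
    rw [← e, List.getElem?_eq_getElem hw]
    simpa using hne
  exact this hhead

-- no full match anywhere at/after c when k0 does not occur in words[c:]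
theorem no_match_absent (k0 : String) (rest words : List String) (c : Nat)
    (hidx : PySem.List.index? (words.drop c) k0 = none) (i : Int)
    (hic : (c : Int) ≤ i) :
    (PySem.List.slice words (some i) (some (i + ((k0 :: rest).length : Int))) == (k0 :: rest)) = false := by
  by_contra hb
  rw [Bool.not_eq_false] at hb
  have hhead := pMatch_head (by omega) hb
  have hmem : k0 ∈ words.drop c := by
    apply List.mem_of_getElem? (i := i.toNat - c)
    rw [List.getElem?_drop]
    have e : c + (i.toNat - c) = i.toNat := by omega
    rw [e]; exact hhead
  exact (PySem.List.index?_eq_none_iff _ _).mp hidx hmem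

theorem loop_eq (k0 : String) (rest words : List String) (s_idx : Int) :
    ccLoop k0 (k0 :: rest) words s_idx = findR (k0 :: rest) words (ccStart words.length s_idx : Int) := by
  induction s_idx using ccLoop.induct (k0 := k0) (kw := k0 :: rest) (words := words) with
  | case1 x hidx =>
    rw [ccLoop, hidx]
    split
    · unfold findR
      rw [List.find?_eq_none.mpr]
      intro i hi
      obtain ⟨hi1, _⟩ := PySem.List.mem_pyRange_one.mp hi
      rw [no_match_absent k0 rest words _ hidx i hi1]
      exact Bool.false_ne_true
    · rename_i j1 heq
      simp at heq
  | case2 x j hidx s' hgt =>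
    rw [ccLoop, hidx]
    split
    · rename_i heq; simp at heq
    · rename_i j1 heq
      injection heq with e
      subst e
      rw [if_pos hgt]
      obtain ⟨hk, _, _⟩ := PySem.List.getElem_of_index?_eq_some hidx
      rw [List.length_drop] at hk
      unfold findR
      rw [List.find?_eq_none.mpr]
      intro i hi
      obtain ⟨hi1, hi2⟩ := PySem.List.mem_pyRange_one.mp hi
      have hgt' : (ccStart words.length x : Int) + j + ((k0 :: rest).length : Int) > (words.length : Int) := hgt
      simp only [List.length_cons] at hgt' hi2
      rw [no_match_below k0 rest words _ j hidx i hi1 (by omega) (by omega)]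
      exact Bool.false_ne_true
  | case3 x j hidx s' hle hinner =>
    rw [ccLoop, hidx]
    split
    · rename_i heq; simp at heq
    · rename_i j1 heq
      injection heq with e
      subst e
      rw [if_neg hle, if_pos hinner]
      obtain ⟨hk, _, _⟩ := PySem.List.getElem_of_index?_eq_some hidx
      rw [List.length_drop] at hk
      have hc := ccStart_le words.length x
      have hle' : ¬ ((ccStart words.length x : Int) + j + ((k0 :: rest).length : Int) > (words.length : Int)) := hle
      have hP : (PySem.List.slice words (some ((ccStart words.length x : Int) + j)) (some (((ccStart words.length x : Int) + j) + ((k0 :: rest).length : Int))) == (k0 :: rest)) = true := by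
        rw [← inner_eq_pMatch (k0 :: rest) words (by simp) _ (by omega) (by omega)]
        exact hinner
      unfold findR
      rw [PySem.List.pyRange_one_append (ccStart words.length x : Int) ((ccStart words.length x : Int) + j) ((words.length : Int) - (k0 :: rest).length + 1)
            (by omega) (by simp only [List.length_cons] at hle' ⊢; omega),
          List.find?_append]
      have hpre : List.find? (fun i => PySem.List.slice words (some i) (some (i + ((k0 :: rest).length : Int))) == (k0 :: rest)) (PySem.List.pyRange (ccStart words.length x : Int) ((ccStart words.length x : Int) + j)) = none := by
        rw [List.find?_eq_none]
        intro i hi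
        obtain ⟨hi1, hi2⟩ := PySem.List.mem_pyRange_one.mp hi
        rw [no_match_below k0 rest words _ j hidx i hi1 (by omega) (by omega)]
        exact Bool.false_ne_true
      rw [hpre, Option.none_or,
          PySem.List.pyRange_one_cons (by simp only [List.length_cons] at hle' ⊢; omega),
          List.find?_cons_of_pos (p := fun i => PySem.List.slice words (some i) (some (i + ((k0 :: rest).length : Int))) == (k0 :: rest)) hP]
  | case4 x j hidx s' hle hinner ih =>
    rw [ccLoop, hidx]
    split
    · rename_i heq; simp at heq
    · rename_i j1 heq
      injection heq with e
      subst e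
      rw [if_neg hle, if_neg hinner]
      obtain ⟨hk, _, _⟩ := PySem.List.getElem_of_index?_eq_some hidx
      rw [List.length_drop] at hk
      have hc := ccStart_le words.length x
      have hle' : ¬ ((ccStart words.length x : Int) + j + ((k0 :: rest).length : Int) > (words.length : Int)) := hle
      have hP : (PySem.List.slice words (some ((ccStart words.length x : Int) + j)) (some (((ccStart words.length x : Int) + j) + ((k0 :: rest).length : Int))) == (k0 :: rest)) = false := by
        rw [← inner_eq_pMatch (k0 :: rest) words (by simp) _ (by omega) (by omega)]
        simpa using hinner
      rw [ih, ccStart_succ words.length ((ccStart words.length x : Int) + j) (by omega) (by omega)]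
      unfold findR
      rw [PySem.List.pyRange_one_append (ccStart words.length x : Int) (((ccStart words.length x : Int) + j) + 1) ((words.length : Int) - (k0 :: rest).length + 1)
            (by omega) (by simp only [List.length_cons] at hle' ⊢; omega),
          List.find?_append]
      have hpre : List.find? (fun i => PySem.List.slice words (some i) (some (i + ((k0 :: rest).length : Int))) == (k0 :: rest)) (PySem.List.pyRange (ccStart words.length x : Int) (((ccStart words.length x : Int) + j) + 1)) = none := by
        rw [List.find?_eq_none]
        intro i hi
        obtain ⟨hi1, hi2⟩ := PySem.List.mem_pyRange_one.mp hi
        by_cases hiv : i < (ccStart words.length x : Int) + j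
        · rw [no_match_below k0 rest words _ j hidx i hi1 hiv (by omega)]
          exact Bool.false_ne_true
        · have he : i = (ccStart words.length x : Int) + j := by omega
          rw [he, hP]
          exact Bool.false_ne_true
      rw [hpre, Option.none_or]

theorem find?_congr_on {α : Type} (p q : α → Bool) (l : List α)
    (h : ∀ x ∈ l, p x = q x) : l.find? p = l.find? q := by
  induction l with
  | nil => rfl
  | cons a t ih =>
    simp only [List.find?_cons]
    rw [h a (List.mem_cons_self), ih (fun x hx => h x (List.mem_cons_of_mem a hx))]

-- B equals the absolute-index scan findR started at the clamped start
theorem alt_eq_findR (kw words : List String) (ss : Int) :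
    check_continuity_alt kw words ss
      = findR kw words (ccStart words.length ss : Int) := by
  unfold check_continuity_alt findR
  have htail : PySem.List.slice words (some (ss + 1)) none
      = words.drop (ccStart words.length ss) := PySem.List.slice_some_none words (ss + 1)
  have hc := ccStart_le words.length ss
  set c : Nat := ccStart words.length ss with hcdef
  rw [htail]
  simp only [List.length_drop]
  have hshift : PySem.List.pyRange (c : Int) ((words.length : Int) - kw.length + 1)
      = (PySem.List.pyRange 0 (((words.length - c : Nat) : Int) - kw.length + 1)).map (fun i => (c : Int) + i) := by
    rw [PySem.List.pyRange_one, PySem.List.pyRange_one]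
    rw [List.map_map]
    have : ((words.length : Int) - kw.length + 1 - c).toNat
        = (((words.length - c : Nat) : Int) - kw.length + 1 - 0).toNat := by omega
    rw [this]
    apply List.map_congr_left
    intro k _
    simp
  rw [hshift, List.find?_map]
  have hpred : ∀ i : Int, 0 ≤ i →
      (PySem.List.slice (words.drop c) (some i) (some (i + (kw.length : Int))) == kw)
        = (PySem.List.slice words (some ((c : Int) + i)) (some (((c : Int) + i) + (kw.length : Int))) == kw) := by
    intro i hi
    rw [PySem.List.slice_toNat _ hi (by omega),
        PySem.List.slice_toNat words (by omega) (by omega),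
        List.drop_drop]
    have e1 : c + i.toNat = ((c : Int) + i).toNat := by omega
    have e2 : (i + (kw.length : Int)).toNat - i.toNat
        = (((c : Int) + i) + (kw.length : Int)).toNat - ((c : Int) + i).toNat := by omega
    rw [e1, e2]
  have hfind : List.find? ((fun i => PySem.List.slice words (some i) (some (i + (kw.length : Int))) == kw) ∘ (fun i => (c : Int) + i))
        (PySem.List.pyRange 0 (((words.length - c : Nat) : Int) - kw.length + 1))
      = List.find? (fun i => PySem.List.slice (words.drop c) (some i) (some (i + (kw.length : Int))) == kw)
        (PySem.List.pyRange 0 (((words.length - c : Nat) : Int) - kw.length + 1)) := by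
    apply find?_congr_on
    intro i hi
    obtain ⟨hi1, _⟩ := PySem.List.mem_pyRange_one.mp hi
    exact (hpred i hi1).symm
  rw [hfind]
  cases hf : List.find? (fun i => PySem.List.slice (words.drop c) (some i) (some (i + (kw.length : Int))) == kw)
      (PySem.List.pyRange 0 (((words.length - c : Nat) : Int) - kw.length + 1)) with
  | none => simp
  | some i =>
    simp only [Option.map_some]
    omega

-- ===== VERDICT (by name: the statement is the Claim_ definition above) =====
theorem check_continuity_spec : Claim_equal_check_continuity := by
  intro kw words ss _ hpre
  unfold Spec_check_continuity
  obtain ⟨k0, rest, rfl⟩ := List.exists_cons_of_ne_nil hpre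
  rw [alt_eq_findR]
  exact loop_eq k0 rest words ss
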